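-- pv_equiv track=rewrite | github.com/elashrry/Hangman | hangman.py | dashed_word
-- ===== SOURCE A (Python) =====
-- def dashed_word(word):
--     """Takes a string word and returnes a list that when joined over an empty
--     string, it resemples word.
--     e.g. input = 'eat', output = ['-', '-', '-']
--     input = "eat apple" ,
--     output = ['-', '-', '-', ' ', '-', '-', '-', '-', '-']"""
--     dashed_list = []
--     for ch in word:
--         if ch == " ":
--             dashed_list.append(" ")
--         else:
--             dashed_list.append("-")
--     return dashed_list
-- ===== SOURCE B (Python) =====
-- def dashed_word(word):
--     return list(" ".join("-" * len(token) for token in word.split(" ")))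
-- ===== Notes on version B (the rewrite author's own statement) =====
-- stated objective: alternative
-- what changed: B replaces the per-character loop with a split-on-space / map-to-dash-runs / join decomposition: split the word on ' ', turn each token into a run of dashes of its length, rejoin with single spaces and list the characters.
import Mathlib
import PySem

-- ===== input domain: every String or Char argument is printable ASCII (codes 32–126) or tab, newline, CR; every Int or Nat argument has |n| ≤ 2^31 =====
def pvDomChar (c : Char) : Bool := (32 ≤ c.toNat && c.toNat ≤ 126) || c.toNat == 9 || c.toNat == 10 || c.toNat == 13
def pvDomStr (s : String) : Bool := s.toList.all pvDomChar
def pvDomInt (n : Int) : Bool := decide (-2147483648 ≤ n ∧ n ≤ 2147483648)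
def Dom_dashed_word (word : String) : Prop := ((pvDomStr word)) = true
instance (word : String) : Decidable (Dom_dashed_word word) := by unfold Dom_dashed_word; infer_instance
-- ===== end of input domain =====

-- B groups the word into space-delimited tokens (split / dash-runs / join) instead of
-- testing each character; same O(n) cost, a different decomposition.

-- ===== PORT A =====
-- for ch in word: append " " or "-"
def dashed_word (word : String) : List String :=
  word.toList.foldl (fun dashed_list ch =>
    if ch = ' ' then dashed_list ++ [" "] else dashed_list ++ ["-"]) []

-- ===== PORT B =====
-- list(" ".join("-" * len(token) for token in word.split(" ")))
def dashed_word_alt (word : String) : List String :=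
  let tokens := PySem.Chars.splitOn word.toList [' ']
  let joined := PySem.Chars.join [' '] (tokens.map (fun t => List.replicate t.length '-'))
  joined.map (fun c => String.mk [c])

-- ===== PRECONDITION & SPEC =====
def Spec_dashed_word (word : String) (out : List String) : Prop := out = dashed_word_alt word
instance (word : String) (out : List String) : Decidable (Spec_dashed_word word out) := by unfold Spec_dashed_word; infer_instance

-- ===== CLAIM (what is proved, stated in full; the proofs are below) =====
def Claim_equal_dashed_word : Prop := ∀ (word : String), Dom_dashed_word word → Spec_dashed_word word (dashed_word word)

-- ===== LEMMAS AND PROOFS =====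

/-- Reference splitter: `splitAux l cur` is what `Chars.splitOn.go [' ']` computes
with empty accumulator, `cur` being the (reversed) current token. -/
def splitAux : List Char → List Char → List (List Char)
  | [], cur => [cur.reverse]
  | c :: rest, cur => if c = ' ' then cur.reverse :: splitAux rest [] else splitAux rest (c :: cur)

theorem splitAux_ne_nil (l cur : List Char) : splitAux l cur ≠ [] := by
  induction l generalizing cur with
  | nil => simp [splitAux]
  | cons c rest ih => simp only [splitAux]; split <;> simp [ih]

theorem go_eq_splitAux : ∀ (fuel : ℕ) (l cur : List Char) (acc : List (List Char)), l.length < fuel →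
    PySem.Chars.splitOn.go [' '] fuel l cur acc = acc.reverse ++ splitAux l cur := by
  intro fuel
  induction fuel with
  | zero => intro l cur acc h; omega
  | succ n ih =>
    intro l cur acc h
    cases l with
    | nil => simp [PySem.Chars.splitOn.go, splitAux]
    | cons c rest =>
      by_cases hc : c = ' '
      · have : PySem.Chars.splitOn.go [' '] (n + 1) (c :: rest) cur acc =
            PySem.Chars.splitOn.go [' '] n rest [] (cur.reverse :: acc) := by
          simp [PySem.Chars.splitOn.go, List.isPrefixOf, hc]
        rw [this, ih rest [] (cur.reverse :: acc) (by simpa using Nat.lt_of_succ_lt_succ h)]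
        simp [splitAux, hc]
      · have : PySem.Chars.splitOn.go [' '] (n + 1) (c :: rest) cur acc =
            PySem.Chars.splitOn.go [' '] n rest (c :: cur) acc := by
          simp [PySem.Chars.splitOn.go, List.isPrefixOf]
          intro h; exact absurd h.symm hc
        rw [this, ih rest (c :: cur) acc (by simpa using Nat.lt_of_succ_lt_succ h)]
        simp [splitAux, hc]

theorem splitOn_eq_splitAux (s : List Char) :
    PySem.Chars.splitOn s [' '] = splitAux s [] := by
  have := go_eq_splitAux (s.length + 1) s [] [] (by omega)
  simpa [PySem.Chars.splitOn] using this

/-- Joining the dash-runs of the tokens reproduces the per-character picture. -/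
theorem join_dashes (l cur : List Char) :
    PySem.Chars.join [' '] ((splitAux l cur).map (fun t => List.replicate t.length '-')) =
      List.replicate cur.length '-' ++ l.map (fun c => if c = ' ' then ' ' else '-') := by
  induction l generalizing cur with
  | nil => simp [splitAux, PySem.Chars.join, List.intercalate]
  | cons c rest ih =>
    by_cases hc : c = ' '
    · obtain ⟨h, t, ht⟩ : ∃ h t, splitAux rest [] = h :: t := by
        cases hh : splitAux rest [] with
        | nil => exact absurd hh (splitAux_ne_nil rest [])
        | cons a b => exact ⟨a, b, rfl⟩
      have hcons : PySem.Chars.join [' ']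
          (((cur.reverse :: splitAux rest []).map (fun t => List.replicate t.length '-'))) =
          List.replicate cur.reverse.length '-' ++ [' '] ++
            PySem.Chars.join [' '] ((splitAux rest []).map (fun t => List.replicate t.length '-')) := by
        rw [ht]
        simp [PySem.Chars.join, List.intercalate]
      simp only [splitAux, hc, if_true]
      rw [hcons, ih []]
      simp [hc]
    · simp only [splitAux, if_neg hc]
      rw [ih (c :: cur)]
      have : List.replicate (c :: cur).length '-' =
          List.replicate cur.length '-' ++ ['-'] := by
        simp [List.replicate_succ']
      rw [this]
      simp [hc]

theorem dashed_word_foldl (l : List Char) (acc : List String) :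
    l.foldl (fun dashed_list ch =>
      if ch = ' ' then dashed_list ++ [" "] else dashed_list ++ ["-"]) acc =
      acc ++ l.map (fun c => if c = ' ' then " " else "-") := by
  induction l generalizing acc with
  | nil => simp
  | cons c rest ih =>
    simp only [List.foldl_cons, List.map_cons]
    by_cases hc : c = ' ' <;> simp [hc, ih]

theorem mk_single_if (c : Char) :
    String.mk [if c = ' ' then ' ' else '-'] = if c = ' ' then " " else "-" := by
  by_cases hc : c = ' ' <;> simp [hc] <;> rfl

-- ===== VERDICT (by name: the statement is the Claim_ definition above) =====
theorem dashed_word_spec : Claim_equal_dashed_word := by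
  intro word _
  unfold Spec_dashed_word dashed_word dashed_word_alt
  dsimp only
  rw [splitOn_eq_splitAux, join_dashes word.toList [], dashed_word_foldl word.toList []]
  simp [Function.comp, mk_single_if]
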